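-- pv_equiv track=rewrite | github.com/msageha/research_anaphora | anaphora/src/extract_feature.py | get_condidate_is_subject_head
-- ===== SOURCE A (Python) =====
-- def get_condidate_is_subject_head(condidate_line, sentence):
--     subject_word_num = 0
--     vector_dict = {'主辞':False}
--     for line in sentence.split('\n'):
--         if line == '':
--             continue
--         if line[0] == '*':
--             tag = line
--             subject_word_num = 0
--         else:
--             if condidate_line == line:
--                 subject_head_num = int(tag.split()[3].split('/')[0])
--                 if subject_head_num == subject_word_num:
--                     vector_dict['主辞'] = True
--                     break
--             subject_word_num += 1
--     return vector_dict
-- ===== SOURCE B (Python) =====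
-- def _blocks(lines):
--     """Group lines into (tag, words) blocks: a block starts at a '*' line,
--     its words are the following non-empty non-'*' lines. Lines before the
--     first '*' line belong to no block and are dropped."""
--     blocks = []
--     i = 0
--     n = len(lines)
--     while i < n:
--         if lines[i] == '' or lines[i][0] != '*':
--             i += 1
--             continue
--         tag = lines[i]
--         i += 1
--         words = []
--         while i < n and (lines[i] == '' or lines[i][0] != '*'):
--             if lines[i] != '':
--                 words.append(lines[i])
--             i += 1
--         blocks.append((tag, words))
--     return blocks
--
--
-- def get_condidate_is_subject_head(condidate_line, sentence):
--     for tag, words in _blocks(sentence.split('\n')):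
--         for i, word in enumerate(words):
--             if word == condidate_line and int(tag.split()[3].split('/')[0]) == i:
--                 return {'主辞': True}
--     return {'主辞': False}
-- ===== Notes on version B (the rewrite author's own statement) =====
-- stated objective: alternative
-- what changed: A is a single-pass state machine threading a current tag and a manually reset word counter through the line loop; B first groups the split lines into (tag, words) blocks and then searches the blocks, enumerating each block's words from 0 and parsing the tag's head number only when a word matches.
import Mathlib
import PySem

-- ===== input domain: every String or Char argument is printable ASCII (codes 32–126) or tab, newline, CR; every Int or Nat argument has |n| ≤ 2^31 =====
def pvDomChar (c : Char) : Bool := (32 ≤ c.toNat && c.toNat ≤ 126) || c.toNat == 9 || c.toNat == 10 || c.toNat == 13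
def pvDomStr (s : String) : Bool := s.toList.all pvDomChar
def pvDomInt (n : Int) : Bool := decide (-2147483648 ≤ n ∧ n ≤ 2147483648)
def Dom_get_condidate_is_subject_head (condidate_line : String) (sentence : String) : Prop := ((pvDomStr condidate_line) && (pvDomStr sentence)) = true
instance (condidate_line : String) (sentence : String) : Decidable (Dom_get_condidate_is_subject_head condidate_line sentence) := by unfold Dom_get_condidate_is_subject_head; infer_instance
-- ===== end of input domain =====

-- B regroups the line scan as (tag, words)-block grouping followed by a block search (same cost, different decomposition).
-- Shared helper: int(tag.split()[3].split('/')[0]); none exactly where that Python expression raises.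
def pvLines (s : String) : List String := (PySem.Str.split? s "\n").getD []

def pvParseHead? (tag : String) : Option Int :=
  (PySem.List.pyGet? (PySem.Str.split₀ tag) 3).bind (fun f =>
    (PySem.List.pyGet? ((PySem.Str.split? f "/").getD []) 0).bind PySem.Int.ofStr?)

-- ===== PORT A =====
-- A's loop: state = (current tag, word counter); Pre_ guarantees pvParseHead? is some at every
-- parse A actually reaches, so the total form `.getD 0` never substitutes for a Python exception inside Pre_.
def pvGoA (cand tag : String) (num : Int) : List String → Bool
  | [] => false
  | line :: rest =>
    if line = "" then pvGoA cand tag num rest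
    else if PySem.Str.pyGet? line 0 = some '*' then pvGoA cand line 0 rest
    else if cand = line then
      if (pvParseHead? tag).getD 0 = num then true
      else pvGoA cand tag (num + 1) rest
    else pvGoA cand tag (num + 1) rest

def get_condidate_is_subject_head (condidate_line : String) (sentence : String) : List (String × Bool) :=
  [("主辞", pvGoA condidate_line "" 0 (pvLines sentence))]

-- ===== PORT B =====
-- `_blocks`' inner while loop: collect the non-empty word lines up to the next '*' line.
def pvTakeWords : List String → List String × List String
  | [] => ([], [])
  | l :: rest =>
    if l ≠ "" ∧ PySem.Str.startswith l "*" then ([], l :: rest)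
    else
      let p := pvTakeWords rest
      ((if l = "" then p.1 else l :: p.1), p.2)

theorem pvTakeWords_snd_len : ∀ L : List String, (pvTakeWords L).2.length ≤ L.length := by
  intro L
  induction L with
  | nil => simp [pvTakeWords]
  | cons l rest ih =>
    simp only [pvTakeWords]
    split
    · simp
    · simpa using Nat.le_succ_of_le ih

-- `_blocks`' outer while loop.
def pvBlocks : List String → List (String × List String)
  | [] => []
  | l :: rest =>
    if l = "" ∨ ¬ PySem.Str.startswith l "*" then pvBlocks rest
    else (l, (pvTakeWords rest).1) :: pvBlocks (pvTakeWords rest).2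
termination_by L => L.length
decreasing_by
  · simp
  · exact Nat.lt_succ_of_le (pvTakeWords_snd_len rest)

-- the inner `for i, word in enumerate(words)` loop (i generalised for the proof)
def pvInner (cand tag : String) (i : Int) : List String → Bool
  | [] => false
  | w :: ws =>
    if w = cand ∧ (pvParseHead? tag).getD 0 = i then true
    else pvInner cand tag (i + 1) ws

-- the outer `for tag, words in _blocks(...)` loop
def pvSearch (cand : String) : List (String × List String) → Bool
  | [] => false
  | (tag, ws) :: rest => if pvInner cand tag 0 ws then true else pvSearch cand rest

def get_condidate_is_subject_head_alt (condidate_line : String) (sentence : String) : List (String × Bool) :=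
  [("主辞", pvSearch condidate_line (pvBlocks (pvLines sentence)))]

-- ===== PRECONDITION & SPEC =====
-- number of non-empty non-'*' lines of L strictly between positions k and j (a word's 0-based index in its block)
def pvWordCount (L : List String) (k j : Nat) : Int :=
  (((L.drop (k + 1)).take (j - k - 1)).countP
    (fun l => decide (l ≠ "") && !PySem.Str.startswith l "*") : Int)

-- a non-empty line that does not start with '*' (a word line, A's `else` branch)
def pvIsWordLine (l : String) : Bool := !decide (l = "") && !PySem.Str.startswith l "*"

-- position k holds the nearest '*' line before position j (a star line, no star line strictly between)
def pvNearTag (L : List String) (k j : Nat) : Bool :=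
  PySem.Str.startswith (L.getD k "") "*" &&
  (List.range' (k + 1) (j - k - 1)).all (fun m => !PySem.Str.startswith (L.getD m "") "*")

-- the nearest '*' line before position j exists and its head field parses
def pvGoodTag (L : List String) (j : Nat) : Bool :=
  (List.range j).any fun k => pvNearTag L k j && (pvParseHead? (L.getD k "")).isSome

-- some candidate word line before position j has a parsable nearest tag whose head number equals
-- its 0-based in-block index, so A's loop breaks with True before reaching position j
def pvBreakBefore (cand : String) (L : List String) (j : Nat) : Bool :=
  (List.range j).any fun j' =>
    pvIsWordLine (L.getD j' "") && decide (L.getD j' "" = cand) &&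
    ((List.range j').any fun k => pvNearTag L k j' &&
      decide (pvParseHead? (L.getD k "") = some (pvWordCount L k j')))

-- Pre_ excludes exactly the inputs on which A raises (NameError on `tag` for a candidate word line
-- with no preceding '*' line, or IndexError/ValueError parsing a malformed nearest '*' tag): every
-- candidate word line must either have a parsable nearest preceding '*' tag, or come after an
-- earlier candidate word whose parsable tag's head number equals its in-block index, so that A's
-- loop breaks with True before reaching it.
def Pre_get_condidate_is_subject_head (condidate_line : String) (sentence : String) : Prop :=
  ∀ j < (pvLines sentence).length,
    (pvIsWordLine ((pvLines sentence).getD j "") &&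
     decide ((pvLines sentence).getD j "" = condidate_line)) = true →
    (pvGoodTag (pvLines sentence) j || pvBreakBefore condidate_line (pvLines sentence) j) = true
instance (condidate_line : String) (sentence : String) : Decidable (Pre_get_condidate_is_subject_head condidate_line sentence) := by unfold Pre_get_condidate_is_subject_head; infer_instance

def pvWitness_get_condidate_is_subject_head : String × String := ("word", "* 0 -1D 0/0 1:D\nword")

def Spec_get_condidate_is_subject_head (condidate_line : String) (sentence : String) (out : List (String × Bool)) : Prop := out = get_condidate_is_subject_head_alt condidate_line sentence
instance (condidate_line : String) (sentence : String) (out : List (String × Bool)) : Decidable (Spec_get_condidate_is_subject_head condidate_line sentence out) := by unfold Spec_get_condidate_is_subject_head; infer_instance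

-- ===== CLAIM (what is proved, stated in full; the proofs are below) =====
def Claim_equal_get_condidate_is_subject_head : Prop := ∀ (condidate_line : String) (sentence : String), Dom_get_condidate_is_subject_head condidate_line sentence → Pre_get_condidate_is_subject_head condidate_line sentence → Spec_get_condidate_is_subject_head condidate_line sentence (get_condidate_is_subject_head condidate_line sentence)

-- ===== LEMMAS AND PROOFS =====

-- for a non-empty line, A's `line[0] == '*'` is B's startswith test
theorem pvStar_iff (l : String) (h : l ≠ "") :
    PySem.Str.pyGet? l 0 = some '*' ↔ PySem.Str.startswith l "*" = true := by
  have hl : l.toList ≠ [] := fun hnil => h (String.toList_eq_nil_iff.mp hnil)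
  rw [PySem.Str.pyGet?_eq, PySem.Str.startswith_eq, PySem.Chars.startswith_iff]
  cases hcs : l.toList with
  | nil => exact absurd hcs hl
  | cons c cs => simp [List.cons_prefix_cons, eq_comm]

-- unfolding equations for pvTakeWords / pvBlocks on each kind of head line
theorem pvTW_star (l : String) (rest : List String) (he : l ≠ "")
    (hs : PySem.Str.startswith l "*" = true) : pvTakeWords (l :: rest) = ([], l :: rest) := by
  simp only [pvTakeWords]
  rw [if_pos ⟨he, hs⟩]

theorem pvTW_empty (rest : List String) :
    pvTakeWords ("" :: rest) = ((pvTakeWords rest).1, (pvTakeWords rest).2) := by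
  simp only [pvTakeWords]
  rw [if_neg (fun hc => hc.1 rfl)]
  simp

theorem pvTW_word (l : String) (rest : List String) (he : l ≠ "")
    (hs : PySem.Str.startswith l "*" = false) :
    pvTakeWords (l :: rest) = (l :: (pvTakeWords rest).1, (pvTakeWords rest).2) := by
  simp only [pvTakeWords]
  rw [if_neg (fun hc => by rw [hs] at hc; exact Bool.false_ne_true hc.2), if_neg he]

theorem pvB_skip (l : String) (rest : List String)
    (h : l = "" ∨ PySem.Str.startswith l "*" = false) : pvBlocks (l :: rest) = pvBlocks rest := by
  rw [pvBlocks]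
  refine if_pos ?_
  rcases h with he | hf
  · exact Or.inl he
  · exact Or.inr (fun ht => Bool.false_ne_true (hf ▸ ht))

theorem pvB_star (l : String) (rest : List String) (he : l ≠ "")
    (hs : PySem.Str.startswith l "*" = true) :
    pvBlocks (l :: rest) = (l, (pvTakeWords rest).1) :: pvBlocks (pvTakeWords rest).2 := by
  rw [pvBlocks]
  rw [if_neg (fun hc => hc.elim he (fun hn => hn hs))]

-- skipping the pre-block prefix does not change the block list
theorem pvBlocks_skip (L : List String) : pvBlocks L = pvBlocks (pvTakeWords L).2 := by
  induction L with
  | nil => simp [pvTakeWords]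
  | cons l rest ih =>
    by_cases he : l = ""
    · subst he
      rw [pvB_skip _ _ (Or.inl rfl), pvTW_empty, ih]
    · cases hs : PySem.Str.startswith l "*" with
      | true => rw [pvTW_star l rest he hs]
      | false => rw [pvB_skip _ _ (Or.inr hs), pvTW_word l rest he hs, ih]

-- every collected prefix word occurs in L before any '*' line
theorem pvTakeWords_mem (L : List String) (w : String) (hw : w ∈ (pvTakeWords L).1) :
    ∃ j, ∃ hj : j < L.length, L[j] = w ∧ w ≠ "" ∧ PySem.Str.startswith w "*" = false ∧
      ∀ k, (hk : k < L.length) → k < j → PySem.Str.startswith L[k] "*" = false := by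
  induction L with
  | nil => simp [pvTakeWords] at hw
  | cons l rest ih =>
    have step : PySem.Str.startswith l "*" = false → w ∈ (pvTakeWords rest).1 →
        ∃ j, ∃ hj : j < (l :: rest).length, (l :: rest)[j] = w ∧ w ≠ "" ∧
          PySem.Str.startswith w "*" = false ∧
          ∀ k, (hk : k < (l :: rest).length) → k < j →
            PySem.Str.startswith (l :: rest)[k] "*" = false := by
      intro hstar0 hw'
      obtain ⟨j, hj, h1, h2, h3, h4⟩ := ih hw'
      exact ⟨j + 1, by simpa using Nat.succ_lt_succ hj, by simpa using h1, h2, h3,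
        fun k hk hkj => by
          cases k with
          | zero => simpa using hstar0
          | succ k' => simpa using h4 k' (by simpa using hk) (by omega)⟩
    by_cases he : l = ""
    · subst he
      rw [pvTW_empty] at hw
      exact step (by decide) hw
    · cases hs : PySem.Str.startswith l "*" with
      | true => rw [pvTW_star l rest he hs] at hw; simp at hw
      | false =>
        rw [pvTW_word l rest he hs] at hw
        rcases List.mem_cons.mp hw with rfl | hw'
        · exact ⟨0, by simp, by simp, he, hs, fun k hk hkj => by omega⟩
        · exact step hs hw'

-- a successful inner search needs a word equal to the candidate
theorem pvInner_true (cand tag : String) : ∀ (i : Int) (ws : List String),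
    pvInner cand tag i ws = true → cand ∈ ws := by
  intro i ws
  induction ws generalizing i with
  | nil => simp [pvInner]
  | cons w ws ih =>
    intro h
    rw [pvInner] at h
    split at h
    · rename_i hc
      simp [hc.1]
    · exact List.mem_cons_of_mem _ (ih _ h)

-- main invariant: A's scan from state (tag, num) = inner search of the current partial block
-- followed by the block search of the rest
theorem pvGoA_eq (cand : String) : ∀ (L : List String) (tag : String) (num : Int),
    pvGoA cand tag num L =
      (if pvInner cand tag num (pvTakeWords L).1 then true
       else pvSearch cand (pvBlocks (pvTakeWords L).2)) := by
  intro L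
  induction L with
  | nil => intro tag num; simp [pvGoA, pvTakeWords, pvInner, pvBlocks, pvSearch]
  | cons l rest ih =>
    intro tag num
    by_cases he : l = ""
    · subst he
      rw [pvGoA, if_pos rfl, pvTW_empty]
      exact ih tag num
    · cases hs : PySem.Str.startswith l "*" with
      | true =>
        rw [pvGoA, if_neg he, if_pos ((pvStar_iff l he).mpr hs), pvTW_star l rest he hs,
          pvB_star l rest he hs]
        simp only [pvInner, pvSearch, if_neg Bool.false_ne_true]
        exact ih l 0
      | false =>
        have hg : ¬ PySem.Str.pyGet? l 0 = some '*' :=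
          fun hp => Bool.false_ne_true (hs ▸ (pvStar_iff l he).mp hp)
        rw [pvGoA, if_neg he, if_neg hg, pvTW_word l rest he hs]
        by_cases hm : cand = l
        · rw [if_pos hm]
          by_cases hh : (pvParseHead? tag).getD 0 = num
          · rw [if_pos hh]
            have hone : pvInner cand tag num (l :: (pvTakeWords rest).1) = true := by
              rw [pvInner, if_pos ⟨hm.symm, hh⟩]
            rw [hone, if_pos rfl]
          · rw [if_neg hh]
            have hstep : pvInner cand tag num (l :: (pvTakeWords rest).1) =
                pvInner cand tag (num + 1) (pvTakeWords rest).1 := by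
              rw [pvInner, if_neg (fun hc => hh hc.2)]
            rw [hstep]
            exact ih tag (num + 1)
        · rw [if_neg hm]
          have hstep : pvInner cand tag num (l :: (pvTakeWords rest).1) =
              pvInner cand tag (num + 1) (pvTakeWords rest).1 := by
            rw [pvInner, if_neg (fun hc => hm hc.1.symm)]
          rw [hstep]
          exact ih tag (num + 1)

-- ===== VERDICT (by name: the statement is the Claim_ definition above) =====
theorem get_condidate_is_subject_head_spec : Claim_equal_get_condidate_is_subject_head := by
  intro cand sentence _hdom hpre
  unfold Spec_get_condidate_is_subject_head
  unfold get_condidate_is_subject_head get_condidate_is_subject_head_alt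
  congr 1
  rw [pvGoA_eq]
  have hfalse : pvInner cand "" 0 (pvTakeWords (pvLines sentence)).1 = false := by
    by_contra hne
    have ht : pvInner cand "" 0 (pvTakeWords (pvLines sentence)).1 = true := by
      simpa using hne
    obtain ⟨j, hj, h1, h2, h3, h4⟩ := pvTakeWords_mem _ _ (pvInner_true cand "" 0 _ ht)
    have hgj : (pvLines sentence).getD j "" = cand := by
      rw [List.getD_eq_getElem _ _ hj]; exact h1
    have hhyp : (pvIsWordLine ((pvLines sentence).getD j "") &&
        decide ((pvLines sentence).getD j "" = cand)) = true := by
      have h3' : PySem.Chars.startswith cand.toList ['*'] = false := by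
        have h := h3; rw [PySem.Str.startswith_eq] at h; simpa using h
      rw [hgj]; simp [pvIsWordLine, h2, h3']
    have hstar : ∃ k, k < j ∧ k < (pvLines sentence).length ∧
        PySem.Str.startswith ((pvLines sentence).getD k "") "*" = true := by
      have hor := hpre j hj hhyp
      simp only [Bool.or_eq_true] at hor
      rcases hor with hg | hb
      · simp only [pvGoodTag, pvNearTag, List.any_eq_true, List.mem_range,
          Bool.and_eq_true] at hg
        obtain ⟨k, hk, ⟨⟨hst, _⟩, _⟩⟩ := hg
        exact ⟨k, hk, by omega, hst⟩
      · simp only [pvBreakBefore, pvNearTag, List.any_eq_true, List.mem_range,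
          Bool.and_eq_true] at hb
        obtain ⟨j', hj', _, k, hk, ⟨⟨hst, _⟩, _⟩⟩ := hb
        exact ⟨k, by omega, by omega, hst⟩
    obtain ⟨k, hkj, hk, hks⟩ := hstar
    rw [List.getD_eq_getElem _ _ hk, h4 k hk hkj] at hks
    exact Bool.false_ne_true hks
  rw [hfalse, pvBlocks_skip (pvLines sentence)]
  simp
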